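-- pv_equiv track=rewrite | github.com/FrancescoFerrulliData/sequence_models_from_scratch | RNN_full_calculation.py | chunks_input_target
-- ===== SOURCE A (Python) =====
-- def chunks_input_target(data, seq_length, char_to_indx):
--     inputs, targets = [], []
--     data_input = data[:-1]
--     data_output = data[1:]
--     for pointer in range(0, len(data) - 1, seq_length):
--         input = [char_to_indx[ch] for ch in data_input[pointer:pointer + seq_length]]
--         target = [char_to_indx[ch] for ch in data_output[pointer:pointer + seq_length]]
--         inputs.append(input)
--         targets.append(target)
--
--     return inputs, targets
-- ===== SOURCE B (Python) =====
-- def chunks_input_target(data, seq_length, char_to_indx):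
--     if seq_length <= 0 or len(data) < 2:
--         return [], []
--     pairs = [(char_to_indx[a], char_to_indx[b]) for a, b in zip(data, data[1:])]
--     inputs, targets = [], []
--     while pairs:
--         chunk, pairs = pairs[:seq_length], pairs[seq_length:]
--         inputs.append([i for i, _ in chunk])
--         targets.append([t for _, t in chunk])
--     return inputs, targets
-- ===== Notes on version B (the rewrite author's own statement) =====
-- stated objective: alternative
-- what changed: B zips the index sequence with its own tail into one list of (input,target) pairs built in a single mapping pass and consumes it chunk by chunk with a while loop, instead of A's per-chunk double mapping over slices of two overlapping copies of the string.
-- intended difference: On empty data with negative seq_length, range(0,-1,neg)=[0] makes A emit one empty chunk and return ([[]],[[]]); B returns ([],[]), the intended value since empty data yields no chunks. — e.g. on chunks_input_target("", -1, []): A returns ([[]], [[]]), B returns ([], [])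
import Mathlib
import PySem

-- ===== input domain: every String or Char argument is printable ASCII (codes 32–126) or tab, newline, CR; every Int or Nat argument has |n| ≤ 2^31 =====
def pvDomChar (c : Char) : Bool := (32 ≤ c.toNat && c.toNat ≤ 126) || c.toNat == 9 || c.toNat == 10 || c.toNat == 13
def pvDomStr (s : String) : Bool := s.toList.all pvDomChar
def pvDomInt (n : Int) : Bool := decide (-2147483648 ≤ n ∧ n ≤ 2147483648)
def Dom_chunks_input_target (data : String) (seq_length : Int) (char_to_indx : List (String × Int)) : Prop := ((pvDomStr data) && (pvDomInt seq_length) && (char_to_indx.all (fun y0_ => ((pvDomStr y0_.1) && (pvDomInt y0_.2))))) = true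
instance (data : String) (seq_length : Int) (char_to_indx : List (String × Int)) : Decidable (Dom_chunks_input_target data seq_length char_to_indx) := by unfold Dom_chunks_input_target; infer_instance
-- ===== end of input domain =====

-- B replaces A's per-chunk double mapping of two overlapping strings by one zip of the index
-- sequence with its own tail and a while-loop that consumes the pair list chunk by chunk (objective: alternative).

-- ===== PORT A =====
-- char_to_indx[ch] (total under Pre_, which guarantees the key is present where it is looked up)
def pvLookup (char_to_indx : List (String × Int)) (ch : Char) : Int :=
  (PySem.Dict.get? (PySem.Dict.mk char_to_indx) (String.ofList [ch])).getD 0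

def chunks_input_target (data : String) (seq_length : Int) (char_to_indx : List (String × Int)) : List (List Int) × List (List Int) :=
  let data_input := PySem.List.slice data.toList none (some (-1))
  let data_output := PySem.List.slice data.toList (some 1) none
  (PySem.List.pyRange 0 (PySem.Str.len data - 1) seq_length).foldl
    (fun st pointer =>
      let input := (PySem.List.slice data_input (some pointer) (some (pointer + seq_length))).map (pvLookup char_to_indx)
      let target := (PySem.List.slice data_output (some pointer) (some (pointer + seq_length))).map (pvLookup char_to_indx)
      (st.1 ++ [input], st.2 ++ [target]))
    ([], [])

-- ===== PORT B =====
-- the 'while pairs:' loop of Source B; s = seq_length (positive by the guard in chunks_input_target_alt)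
def pvAltLoop (s : Nat) (hs : 0 < s) (pairs : List (Int × Int)) (inputs targets : List (List Int)) : List (List Int) × List (List Int) :=
  match pairs with
  | [] => (inputs, targets)
  | p :: rest =>
      pvAltLoop s hs ((p :: rest).drop s)
        (inputs ++ [((p :: rest).take s).map Prod.fst])
        (targets ++ [((p :: rest).take s).map Prod.snd])
termination_by pairs.length
decreasing_by simp; omega

def chunks_input_target_alt (data : String) (seq_length : Int) (char_to_indx : List (String × Int)) : List (List Int) × List (List Int) :=
  if h : seq_length ≤ 0 ∨ PySem.Str.len data < 2 then ([], [])
  else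
    let pairs := (data.toList.zip (PySem.List.slice data.toList (some 1) none)).map
      (fun ab => (pvLookup char_to_indx ab.1, pvLookup char_to_indx ab.2))
    pvAltLoop seq_length.toNat (by have := (not_or.mp h).1; omega) pairs [] []

-- ===== PRECONDITION & SPEC =====
-- Pre_ excludes exactly the inputs where Python A raises: seq_length = 0 (range ValueError), and a
-- character of data missing from char_to_indx while A reaches a lookup (seq_length > 0 and len(data) > 1 — KeyError).
def Pre_chunks_input_target (data : String) (seq_length : Int) (char_to_indx : List (String × Int)) : Prop :=
  seq_length ≠ 0 ∧ (seq_length < 0 ∨ data.toList.length ≤ 1 ∨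
    (data.toList.all (fun ch => (PySem.Dict.get? (PySem.Dict.mk char_to_indx) (String.ofList [ch])).isSome)) = true)
instance (data : String) (seq_length : Int) (char_to_indx : List (String × Int)) : Decidable (Pre_chunks_input_target data seq_length char_to_indx) := by unfold Pre_chunks_input_target; infer_instance

def pvWitness_chunks_input_target : String × Int × (List (String × Int)) :=
  ("abcab", 2, [("a", 0), ("b", 1), ("c", 2)])

-- On empty data with negative seq_length, range(0,-1,neg) = [0] makes A emit one empty chunk,
-- returning ([[]],[[]]); B returns ([],[]) — the intended value, since empty data yields no chunks.
def D_chunks_input_target (data : String) (seq_length : Int) (char_to_indx : List (String × Int)) : Prop :=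
  data = "" ∧ seq_length < 0
instance (data : String) (seq_length : Int) (char_to_indx : List (String × Int)) : Decidable (D_chunks_input_target data seq_length char_to_indx) := by unfold D_chunks_input_target; infer_instance

def Spec_chunks_input_target (data : String) (seq_length : Int) (char_to_indx : List (String × Int)) (out : List (List Int) × List (List Int)) : Prop := ¬ D_chunks_input_target data seq_length char_to_indx → out = chunks_input_target_alt data seq_length char_to_indx
instance (data : String) (seq_length : Int) (char_to_indx : List (String × Int)) (out : List (List Int) × List (List Int)) : Decidable (Spec_chunks_input_target data seq_length char_to_indx out) := by unfold Spec_chunks_input_target; infer_instance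

def pvDiffWitness_chunks_input_target : String × Int × (List (String × Int)) := ("", -1, [])
def pvDiffWitnessOut_chunks_input_target : (List (List Int) × List (List Int)) × (List (List Int) × List (List Int)) :=
  (([[]], [[]]), ([], []))

-- ===== CLAIM (what is proved, stated in full; the proofs are below) =====
def Claim_unchanged_chunks_input_target : Prop := ∀ (data : String) (seq_length : Int) (char_to_indx : List (String × Int)), Dom_chunks_input_target data seq_length char_to_indx → Pre_chunks_input_target data seq_length char_to_indx → Spec_chunks_input_target data seq_length char_to_indx (chunks_input_target data seq_length char_to_indx)
def Claim_changed_chunks_input_target : Prop := Dom_chunks_input_target (pvDiffWitness_chunks_input_target.1) (pvDiffWitness_chunks_input_target.2.1) (pvDiffWitness_chunks_input_target.2.2) ∧ Pre_chunks_input_target (pvDiffWitness_chunks_input_target.1) (pvDiffWitness_chunks_input_target.2.1) (pvDiffWitness_chunks_input_target.2.2) ∧ D_chunks_input_target (pvDiffWitness_chunks_input_target.1) (pvDiffWitness_chunks_input_target.2.1) (pvDiffWitness_chunks_input_target.2.2) ∧ chunks_input_target (pvDiffWitness_chunks_input_target.1) (pvDiffWitness_chunks_input_target.2.1) (pvDiffWitness_chunks_input_target.2.2)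 = pvDiffWitnessOut_chunks_input_target.1 ∧ chunks_input_target_alt (pvDiffWitness_chunks_input_target.1) (pvDiffWitness_chunks_input_target.2.1) (pvDiffWitness_chunks_input_target.2.2) = pvDiffWitnessOut_chunks_input_target.2 ∧ pvDiffWitnessOut_chunks_input_target.1 ≠ pvDiffWitnessOut_chunks_input_target.2
def Claim_exact_chunks_input_target : Prop := ∀ (data : String) (seq_length : Int) (char_to_indx : List (String × Int)), Dom_chunks_input_target data seq_length char_to_indx → Pre_chunks_input_target data seq_length char_to_indx → D_chunks_input_target data seq_length char_to_indx → chunks_input_target data seq_length char_to_indx ≠ chunks_input_target_alt data seq_length char_to_indx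

-- ===== LEMMAS AND PROOFS =====

-- range(0, b, s) with s < 0 and b ≥ 0 is empty
lemma pvRange_neg_nil (b s : Int) (hb : 0 ≤ b) (hs : s < 0) : PySem.List.pyRange 0 b s = [] := by
  simp only [PySem.List.pyRange]
  rw [if_neg (by omega)]
  simp only [if_neg (by omega : ¬ (0:Int) < s), if_neg (by omega : ¬ b < 0)]
  simp

-- range(0, b, s) with s > 0 and b ≤ 0 is empty
lemma pvRange_pos_nil (b s : Int) (hb : b ≤ 0) (hs : 0 < s) : PySem.List.pyRange 0 b s = [] := by
  rw [PySem.List.pyRange_of_pos _ _ hs, if_neg (by omega)]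
  simp

-- range(0, -1, s) with s < 0 is [0]
lemma pvRange_neg_singleton (s : Int) (hs : s < 0) : PySem.List.pyRange 0 (-1) s = [0] := by
  simp only [PySem.List.pyRange]
  rw [if_neg (by omega)]
  simp only [if_neg (by omega : ¬ (0:Int) < s), if_pos (by omega : (-1:Int) < 0)]
  have h1 : (0 - (-1) + -s - 1) = -s := by ring
  rw [h1, Int.ediv_self (by omega)]
  simp

-- one positive step of range(0, m, s): first pointer 0, the rest shifted by s
lemma pvRange_step (s : Nat) (hs : 0 < s) (m : Nat) (hm : 0 < m) :
    PySem.List.pyRange 0 (m : Int) (s : Int) =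
      0 :: (PySem.List.pyRange 0 ((m : Int) - s) (s : Int)).map (fun p => (s : Int) + p) := by
  have hs' : (0:Int) < s := by exact_mod_cast hs
  rw [PySem.List.pyRange_of_pos _ _ hs', PySem.List.pyRange_of_pos _ _ hs']
  rw [if_pos (by omega : (0:Int) < m)]
  have hcount : (((m:Int) + s - 1) / s).toNat
      = (if (0:Int) < m - s then (((m:Int) - s + s - 1) / s).toNat else 0) + 1 := by
    by_cases hms : (0:Int) < (m:Int) - s
    · rw [if_pos hms]
      have h1 : ((m:Int) + s - 1) = ((m:Int) - 1 + 1 * s) := by ring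
      have h2 : ((m:Int) - s + s - 1) = (m:Int) - 1 := by ring
      rw [h1, h2, Int.add_mul_ediv_right _ _ (by omega : (s:Int) ≠ 0)]
      have h3 : 0 ≤ ((m:Int) - 1) / s := Int.ediv_nonneg (by omega) (by omega)
      omega
    · rw [if_neg hms]
      have : ((m:Int) + s - 1) / s = 1 := by
        have := Int.ediv_emod_unique (a := (m:Int) + s - 1) (b := (s:Int)) (r := (m:Int) - 1) (q := 1)
        omega
      simp [this]
  simp only [sub_zero]
  rw [hcount, List.range_succ_eq_map]
  simp only [List.map_cons, List.map_map]
  refine List.cons_eq_cons.mpr ⟨by simp, ?_⟩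
  apply List.map_congr_left
  intro k _
  simp only [Function.comp_apply, Nat.succ_eq_add_one]
  push_cast
  ring

-- fst/snd projections of zip(l, l[1:])
lemma pvZipFst {α : Type} (l : List α) : (l.zip (l.drop 1)).map Prod.fst = l.dropLast := by
  induction l with
  | nil => simp
  | cons a t ih =>
    cases t with
    | nil => simp
    | cons b t' => simpa using ih

lemma pvZipSnd {α : Type} (l : List α) : (l.zip (l.drop 1)).map Prod.snd = l.drop 1 := by
  exact List.map_snd_zip (by simp)

-- core: A's chunk loop over range(0, len(pairs), s), phrased on the pair list, IS B's consuming loop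
lemma pvCore (s : Nat) (hs : 0 < s) (fuel : Nat) :
    ∀ (P : List (Int × Int)), P.length ≤ fuel → ∀ (I T : List (List Int)),
    (PySem.List.pyRange 0 (P.length : Int) (s : Int)).foldl
      (fun st p => (st.1 ++ [((P.drop p.toNat).take s).map Prod.fst],
                    st.2 ++ [((P.drop p.toNat).take s).map Prod.snd])) (I, T)
      = pvAltLoop s hs P I T := by
  induction fuel with
  | zero =>
    intro P hP I T
    have : P = [] := List.length_eq_zero_iff.mp (by omega)
    subst this
    rw [pvAltLoop]
    simp [pvRange_pos_nil 0 (s:Int) (le_refl _) (by exact_mod_cast hs)]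
  | succ fuel ih =>
    intro P hP I T
    match P with
    | [] =>
      rw [pvAltLoop]
      simp [pvRange_pos_nil 0 (s:Int) (le_refl _) (by exact_mod_cast hs)]
    | p :: rest =>
      rw [pvRange_step s hs _ (by simp)]
      simp only [List.foldl_cons, List.foldl_map]
      have hs' : (0:Int) < s := by exact_mod_cast hs
      have hlen : PySem.List.pyRange 0 (((p :: rest).length : Int) - s) (s : Int)
          = PySem.List.pyRange 0 ((((p :: rest).drop s).length : Int)) (s : Int) := by
        by_cases h : s ≤ rest.length + 1
        · congr 1; simp only [List.length_cons, List.length_drop]; omega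
        · rw [pvRange_pos_nil _ _ (by simp only [List.length_cons]; omega) hs',
              pvRange_pos_nil _ _ (by simp only [List.length_drop, List.length_cons]; omega) hs']
      rw [hlen]
      have hbody : ∀ (st : List (List Int) × List (List Int)) (q : Int),
          q ∈ PySem.List.pyRange 0 ((((p :: rest).drop s).length : Int)) (s : Int) →
          (st.1 ++ [(((p :: rest).drop ((s : Int) + q).toNat).take s).map Prod.fst],
           st.2 ++ [(((p :: rest).drop ((s : Int) + q).toNat).take s).map Prod.snd])
          = (st.1 ++ [((((p :: rest).drop s).drop q.toNat).take s).map Prod.fst],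
             st.2 ++ [((((p :: rest).drop s).drop q.toNat).take s).map Prod.snd]) := by
        intro st q hq
        have hq0 : 0 ≤ q := ((PySem.List.mem_pyRange_iff_of_pos (by exact_mod_cast hs) q).mp hq).1
        have hdq : ((s : Int) + q).toNat = s + q.toNat := by omega
        rw [hdq, ← List.drop_drop]
      refine (PySem.List.foldl_congr_mem _ _
        (fun st (q : Int) => (st.1 ++ [((((p :: rest).drop s).drop q.toNat).take s).map Prod.fst],
                              st.2 ++ [((((p :: rest).drop s).drop q.toNat).take s).map Prod.snd]))
        _ (fun acc x hx => hbody acc x hx)).trans ?_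
      rw [ih ((p :: rest).drop s) (by simp only [List.length_drop, List.length_cons] at hP ⊢; omega)]
      conv_rhs => rw [pvAltLoop]
      simp only [Int.toNat_zero, List.drop_zero]

-- A's per-pointer slice-and-map equals the projection of a slice of the pair list
lemma pvChunkEq (data : String) (char_to_indx : List (String × Int)) (s : Nat) (p : Int) (hp : 0 ≤ p)
    (P : List (Int × Int))
    (hP : P = (data.toList.zip (PySem.List.slice data.toList (some 1) none)).map
      (fun ab => (pvLookup char_to_indx ab.1, pvLookup char_to_indx ab.2))) :
    (PySem.List.slice (PySem.List.slice data.toList none (some (-1))) (some p) (some (p + s))).map (pvLookup char_to_indx)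
      = ((P.drop p.toNat).take s).map Prod.fst
    ∧ (PySem.List.slice (PySem.List.slice data.toList (some 1) none) (some p) (some (p + s))).map (pvLookup char_to_indx)
      = ((P.drop p.toNat).take s).map Prod.snd := by
  have hPz : P = (data.toList.map (pvLookup char_to_indx)).zip
      ((data.toList.map (pvLookup char_to_indx)).drop 1) := by
    rw [hP, PySem.List.slice_from_one, ← List.drop_one, ← List.map_drop, List.zip_map]
    rfl
  have hfst : P.map Prod.fst = (data.toList.map (pvLookup char_to_indx)).dropLast := by
    rw [hPz]; exact pvZipFst _
  have hsnd : P.map Prod.snd = (data.toList.map (pvLookup char_to_indx)).drop 1 := by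
    rw [hPz]; exact pvZipSnd _
  have htn : (p + (s : Int)).toNat - p.toNat = s := by omega
  constructor
  · rw [PySem.List.slice_to_neg_one,
        PySem.List.slice_toNat _ hp (by omega), htn,
        List.map_take, List.map_drop, List.map_dropLast, ← hfst,
        List.map_take, List.map_drop]
  · rw [PySem.List.slice_from_one, ← List.drop_one,
        PySem.List.slice_toNat _ hp (by omega), htn,
        List.map_take, List.map_drop, List.map_drop, ← hsnd,
        List.map_take, List.map_drop]

-- ===== VERDICT (by name: the statement is the Claim_ definition above) =====
theorem chunks_input_target_spec : Claim_unchanged_chunks_input_target := by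
  intro data seq_length char_to_indx _ hpre hnd
  obtain ⟨hs0, _⟩ := hpre
  unfold chunks_input_target chunks_input_target_alt
  simp only [PySem.Str.len_eq]
  by_cases hsp : seq_length ≤ 0
  · -- A's range is empty, B's guard fires
    rw [dif_pos (Or.inl hsp)]
    have hne : data ≠ "" ∨ ¬ seq_length < 0 := by
      by_contra h; push_neg at h
      exact hnd ⟨h.1, h.2⟩
    have hlen : 0 ≤ (data.toList.length : Int) - 1 := by
      rcases hne with h | h
      · have : data.toList ≠ [] := by
          simpa using h
        have := List.length_pos_iff.mpr this
        omega
      · omega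
    rw [pvRange_neg_nil _ _ hlen (by omega)]
    rfl
  · push_neg at hsp
    by_cases hlen : data.toList.length < 2
    · rw [dif_pos (Or.inr (by simpa using (by exact_mod_cast hlen : (data.toList.length : Int) < 2)))]
      rw [pvRange_pos_nil _ _ (by omega) hsp]
      rfl
    · push_neg at hlen
      obtain ⟨sn, rfl⟩ : ∃ sn : Nat, seq_length = (sn : Int) := ⟨seq_length.toNat, by omega⟩
      rw [dif_neg (by push_neg; exact ⟨hsp, by exact_mod_cast hlen⟩)]
      simp only [Int.toNat_natCast]
      set P := (data.toList.zip (PySem.List.slice data.toList (some 1) none)).map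
        (fun ab => (pvLookup char_to_indx ab.1, pvLookup char_to_indx ab.2)) with hP
      have hPlen : ((data.toList.length : Int) - 1) = (P.length : Int) := by
        rw [hP, PySem.List.slice_from_one]
        simp only [List.length_map, List.length_zip, List.length_tail]
        omega
      rw [hPlen]
      have hbody : ∀ (st : List (List Int) × List (List Int)) (p : Int),
          p ∈ PySem.List.pyRange 0 (P.length : Int) (sn : Int) →
          (st.1 ++ [(PySem.List.slice (PySem.List.slice data.toList none (some (-1))) (some p) (some (p + (sn : Int)))).map (pvLookup char_to_indx)],
           st.2 ++ [(PySem.List.slice (PySem.List.slice data.toList (some 1) none) (some p) (some (p + (sn : Int)))).map (pvLookup char_to_indx)])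
          = (st.1 ++ [((P.drop p.toNat).take sn).map Prod.fst],
             st.2 ++ [((P.drop p.toNat).take sn).map Prod.snd]) := by
        intro st p hmem
        have hp0 : 0 ≤ p := ((PySem.List.mem_pyRange_iff_of_pos hsp p).mp hmem).1
        obtain ⟨h1, h2⟩ := pvChunkEq data char_to_indx sn p hp0 P hP
        rw [h1, h2]
      refine (PySem.List.foldl_congr_mem _ _
        (fun st (p : Int) => (st.1 ++ [((P.drop p.toNat).take sn).map Prod.fst],
                              st.2 ++ [((P.drop p.toNat).take sn).map Prod.snd]))
        _ hbody).trans ?_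
      exact pvCore sn (by exact_mod_cast hsp) P.length P (le_refl _) [] []

theorem chunks_input_target_changed : Claim_changed_chunks_input_target := by
  unfold Claim_changed_chunks_input_target; decide

theorem chunks_input_target_tight : Claim_exact_chunks_input_target := by
  intro data seq_length char_to_indx _ _ hd
  obtain ⟨hdata, hneg⟩ := hd
  subst hdata
  unfold chunks_input_target chunks_input_target_alt
  rw [dif_pos (Or.inl (by omega))]
  simp only [PySem.Str.len_eq]
  have : (("" : String).toList.length : Int) - 1 = -1 := by decide
  rw [this, pvRange_neg_singleton _ hneg]
  simp
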